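-- pv_equiv track=rewrite | github.com/ritujadik/DSA-Problem | Jul_2025/Array/July_Second_Week/19.07.25/maximum_k_subarray_sum.py | maximum_k_subarray_sum
-- ===== SOURCE A (Python) =====
-- def maximum_k_subarray_sum(x,k):
--     left = 0
--     n = len(x)
--     new_sub_array = []
--     current_sum = sum(x[:k])
--     new_sub_array.append(current_sum)
--
--     for right in range(k,n):
--          current_sum+= x[right]-x[left]
--          left+=1
--          new_sub_array.append(current_sum)
--     return max(new_sub_array)
-- ===== SOURCE B (Python) =====
-- def maximum_k_subarray_sum(x, k):
--     n = len(x)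
--     # prefix sums: prefix[j] = sum of x[:j]
--     prefix = [0]
--     s = 0
--     for v in x:
--         s += v
--         prefix.append(s)
--     best = sum(x[:k])
--     for i in range(1, n - k + 1):
--         best = max(best, prefix[i + k] - prefix[i])
--     return best
-- ===== Notes on version B (the rewrite author's own statement) =====
-- stated objective: alternative
-- what changed: Replaces the incremental slide (running sum updated by adding x[right] and subtracting x[left], collecting every window sum in a list and taking max at the end) with a precomputed prefix-sum table queried by index differences and a running best maximum, never materialising the list of window sums.
import Mathlib
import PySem

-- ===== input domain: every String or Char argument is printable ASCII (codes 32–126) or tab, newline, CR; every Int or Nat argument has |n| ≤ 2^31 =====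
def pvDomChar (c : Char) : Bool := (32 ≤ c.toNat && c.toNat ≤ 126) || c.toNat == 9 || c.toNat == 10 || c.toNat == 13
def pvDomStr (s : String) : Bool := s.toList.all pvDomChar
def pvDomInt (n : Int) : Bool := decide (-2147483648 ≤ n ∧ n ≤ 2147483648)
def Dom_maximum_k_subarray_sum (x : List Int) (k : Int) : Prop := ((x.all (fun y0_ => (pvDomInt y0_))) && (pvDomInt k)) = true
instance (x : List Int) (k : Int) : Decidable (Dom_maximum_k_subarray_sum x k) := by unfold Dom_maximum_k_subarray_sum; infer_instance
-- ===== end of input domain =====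

-- B replaces A's incremental sliding-window update (and its list of all window sums, maxed at
-- the end) with a prefix-sum table queried by index differences and a running maximum
-- (objective: alternative decomposition, same O(n) cost).

-- ===== PORT A =====
def maximum_k_subarray_sum (x : List Int) (k : Int) : Int :=
  let n : Int := x.length
  let current_sum := (PySem.List.slice x none (some k)).sum
  let st :=
    (PySem.List.pyRange k n 1).foldl
      (fun (st : Int × Int × List Int) right =>
        let left := st.1
        let current_sum := st.2.1 + PySem.List.pyGetD x right 0 - PySem.List.pyGetD x left 0
        (left + 1, current_sum, st.2.2 ++ [current_sum]))
      (0, current_sum, [current_sum])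
  -- new_sub_array is nonempty by construction, so Python's max never raises; getD 0 is unreachable
  (PySem.List.max? st.2.2 (fun y => y)).getD 0

-- ===== PORT B =====
-- B-side helper: the prefix-sum table built by Source B's first loop (prefix[j] = sum(x[:j]))
def pvPrefix (x : List Int) : List Int :=
  (x.foldl (fun (st : Int × List Int) v => (st.1 + v, st.2 ++ [st.1 + v])) (0, [0])).2

def maximum_k_subarray_sum_alt (x : List Int) (k : Int) : Int :=
  let n : Int := x.length
  let pref := pvPrefix x
  let best := (PySem.List.slice x none (some k)).sum
  (PySem.List.pyRange 1 (n - k + 1) 1).foldl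
    (fun best i => max best (PySem.List.pyGetD pref (i + k) 0 - PySem.List.pyGetD pref i 0))
    best

-- ===== PRECONDITION & SPEC =====
-- For k < 0 A's `left` index runs past the end of x and A raises IndexError; Pre_ excludes exactly that.
def Pre_maximum_k_subarray_sum (_x : List Int) (k : Int) : Prop := 0 ≤ k
instance (x : List Int) (k : Int) : Decidable (Pre_maximum_k_subarray_sum x k) := by unfold Pre_maximum_k_subarray_sum; infer_instance
def pvWitness_maximum_k_subarray_sum : List Int × Int := ([1, -2, 3, 4], 2)

def Spec_maximum_k_subarray_sum (x : List Int) (k : Int) (out : Int) : Prop := out = maximum_k_subarray_sum_alt x k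
instance (x : List Int) (k : Int) (out : Int) : Decidable (Spec_maximum_k_subarray_sum x k out) := by unfold Spec_maximum_k_subarray_sum; infer_instance

-- ===== CLAIM (what is proved, stated in full; the proofs are below) =====
def Claim_equal_maximum_k_subarray_sum : Prop := ∀ (x : List Int) (k : Int), Dom_maximum_k_subarray_sum x k → Pre_maximum_k_subarray_sum x k → Spec_maximum_k_subarray_sum x k (maximum_k_subarray_sum x k)

-- ===== LEMMAS AND PROOFS =====

-- prefix sum of the first i elements (i an Int index, clamped at 0)
def pvP (x : List Int) (i : Int) : Int := (x.take i.toNat).sum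
-- sum of the length-k window starting at i
def pvF (x : List Int) (k i : Int) : Int := pvP x (i + k) - pvP x i

lemma pvP_succ (x : List Int) (a : Int) (h0 : 0 ≤ a) (h1 : a < (x.length : Int)) :
    pvP x (a + 1) = pvP x a + x[a.toNat]'(by omega) := by
  have : (a + 1).toNat = a.toNat + 1 := by omega
  simp [pvP, this, List.sum_take_succ x a.toNat (by omega)]

-- invariant of A's sliding loop: starting at right = a with left = a - k and
-- current_sum = sum x[a-k:a], the fold appends exactly the window sums pvF x k i for
-- i = a-k+1 .. n-k.
lemma pv_Aloop (x : List Int) (k : Int) (hk : 0 ≤ k) :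
    ∀ (m : Nat) (a : Int), k ≤ a → a + m = (x.length : Int) →
    ∀ (acc : List Int),
    (PySem.List.pyRange a (x.length : Int) 1).foldl
      (fun (st : Int × Int × List Int) right =>
        let left := st.1
        let current_sum := st.2.1 + PySem.List.pyGetD x right 0 - PySem.List.pyGetD x left 0
        (left + 1, current_sum, st.2.2 ++ [current_sum]))
      (a - k, pvP x a - pvP x (a - k), acc)
    = ((x.length : Int) - k, pvP x (x.length : Int) - pvP x ((x.length : Int) - k),
       acc ++ (PySem.List.pyRange (a - k + 1) ((x.length : Int) - k + 1) 1).map (pvF x k)) := by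
  intro m
  induction m with
  | zero =>
    intro a hka hlen acc
    have ha : a = (x.length : Int) := by omega
    rw [PySem.List.pyRange_one_eq_nil (by omega), PySem.List.pyRange_one_eq_nil (by omega)]
    simp [ha]
  | succ m ih =>
    intro a hka hlen acc
    have haltn : a < (x.length : Int) := by omega
    rw [PySem.List.pyRange_one_cons haltn]
    simp only [List.foldl_cons]
    have h0a : 0 ≤ a := by omega
    have g1 : PySem.List.pyGetD x a 0 = x[a.toNat]'(by omega) :=
      PySem.List.pyGetD_eq_getElem x 0 h0a (by omega)
    have g2 : PySem.List.pyGetD x (a - k) 0 = x[(a - k).toNat]'(by omega) :=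
      PySem.List.pyGetD_eq_getElem x 0 (by omega) (by omega)
    have cs : pvP x a - pvP x (a - k) + PySem.List.pyGetD x a 0 - PySem.List.pyGetD x (a - k) 0
        = pvP x (a + 1) - pvP x (a + 1 - k) := by
      rw [g1, g2, pvP_succ x a h0a haltn]
      have h' : a + 1 - k = (a - k) + 1 := by ring
      rw [h', pvP_succ x (a - k) (by omega) (by omega)]
      ring
    simp only [cs]
    rw [show a - k + 1 = a + 1 - k from by ring]
    rw [ih (a + 1) (by omega) (by omega) (acc ++ [pvP x (a + 1) - pvP x (a + 1 - k)])]
    rw [PySem.List.pyRange_one_cons (show a + 1 - k < (x.length : Int) - k + 1 from by omega)]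
    simp only [List.map_cons]
    have hf : pvF x k (a + 1 - k) = pvP x (a + 1) - pvP x (a + 1 - k) := by
      simp only [pvF]; rw [show a + 1 - k + k = a + 1 from by ring]
    rw [hf]
    simp [List.append_assoc]

-- the prefix table built by Source B's scan loop, in closed form
lemma pv_scan (x : List Int) :
    ∀ (s : Int) (acc : List Int),
    (x.foldl (fun (st : Int × List Int) v => (st.1 + v, st.2 ++ [st.1 + v])) (s, acc)).2
    = acc ++ (List.range x.length).map (fun j => s + (x.take (j + 1)).sum) := by
  induction x with
  | nil => intro s acc; simp
  | cons v xs ih =>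
    intro s acc
    simp only [List.foldl_cons, List.length_cons, List.range_succ_eq_map, List.map_cons,
      List.map_map]
    rw [ih (s + v) (acc ++ [s + v])]
    simp [Function.comp_def, add_assoc]

lemma pvPrefix_eq (x : List Int) :
    pvPrefix x = (List.range (x.length + 1)).map (fun j => (x.take j).sum) := by
  unfold pvPrefix
  rw [pv_scan x 0 [0]]
  simp [List.range_succ_eq_map, Function.comp_def]

lemma pvPrefix_get (x : List Int) (j : Int) (h0 : 0 ≤ j) (h1 : j ≤ (x.length : Int)) :
    PySem.List.pyGetD (pvPrefix x) j 0 = pvP x j := by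
  have hlen : (pvPrefix x).length = x.length + 1 := by simp [pvPrefix_eq]
  rw [PySem.List.pyGetD_eq_getElem (pvPrefix x) 0 h0 (by omega)]
  simp [pvPrefix_eq, pvP, List.getElem_map, List.getElem_range]

-- ===== VERDICT (by name: the statement is the Claim_ definition above) =====
theorem maximum_k_subarray_sum_spec : Claim_equal_maximum_k_subarray_sum := by
  intro x k _dom hk
  unfold Spec_maximum_k_subarray_sum
  have hk' : (0 : Int) ≤ k := hk
  by_cases hnk : (x.length : Int) ≤ k
  · -- loops of both programs empty; both return sum(x[:k])
    simp only [maximum_k_subarray_sum, maximum_k_subarray_sum_alt,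
      PySem.List.pyRange_one_eq_nil hnk, PySem.List.pyRange_one_eq_nil (show (x.length : Int) - k + 1 ≤ 1 by omega),
      List.foldl_nil]
    rw [PySem.List.max?_id_cons]
    simp
  · rw [not_le] at hnk
    have hrange0 : PySem.List.pyRange (0 : Int) ((x.length : Int) - k + 1) 1
        = 0 :: PySem.List.pyRange 1 ((x.length : Int) - k + 1) 1 := by
      rw [PySem.List.pyRange_one_cons (by omega)]; norm_num
    have hcs0 : (PySem.List.slice x none (some k)).sum = pvP x k := by
      rw [PySem.List.slice_to x hk']; rfl
    have hinit : pvP x k - pvP x (k - k) = pvP x k := by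
      simp [pvP]
    have hA := pv_Aloop x k hk' (x.length - k.toNat) k (le_refl k) (by omega) [pvP x k]
    rw [hinit] at hA
    have hAval : maximum_k_subarray_sum x k
        = ((PySem.List.pyRange 1 ((x.length : Int) - k + 1) 1).map (pvF x k)).foldl max (pvP x k) := by
      simp only [maximum_k_subarray_sum, hcs0]
      rw [show k - k = (0 : Int) by ring] at hA
      rw [hA]
      simp only [List.singleton_append, show (0 : Int) + 1 = 1 from by norm_num]
      rw [PySem.List.max?_id_cons]
      simp
    have hBval : maximum_k_subarray_sum_alt x k
        = (PySem.List.pyRange 1 ((x.length : Int) - k + 1) 1).foldl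
            (fun best i => max best (pvF x k i)) (pvP x k) := by
      simp only [maximum_k_subarray_sum_alt, hcs0]
      apply PySem.List.foldl_congr_mem
      intro acc i hi
      rw [PySem.List.mem_pyRange_one] at hi
      rw [pvPrefix_get x (i + k) (by omega) (by omega), pvPrefix_get x i (by omega) (by omega)]
      rfl
    rw [hAval, hBval, List.foldl_map]
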